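-- pv_equiv track=rewrite | github.com/Bhavik-Sanghar/ACNS | Elgamal/Elgmal.py | find_first_primitive_root
-- ===== SOURCE A (Python) =====
-- def find_first_primitive_root(val):
--     # Loop through all candidates g from 2 to val-1
--     for g in range(2, val):
--         unique_set = set()  # To store the results of g^i % val
--
--         # Loop over powers from 1 to val-1
--         for i in range(1, val):
--             result = pow(g, i, val)  # g^i % val
--             unique_set.add(result)
--
--         # Check if the set contains exactly val-1 elements (i.e., order = val - 1)
--         if len(unique_set) == val - 1:
--             return g  # Return the first primitive root found
--
--     return None  # Return None if no primitive root is found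
-- ===== SOURCE B (Python) =====
-- def find_first_primitive_root(val):
--     # For each candidate g, walk x <- x*g % val to find the multiplicative
--     # order of g directly, stopping early at the first power equal to 1;
--     # g is a primitive root iff that order is exactly val - 1.
--     for g in range(2, val):
--         x = g
--         t = 1
--         while x != 1 and t < val - 1:
--             x = x * g % val
--             t += 1
--         if x == 1 and t == val - 1:
--             return g
--     return None
-- ===== Notes on version B (the rewrite author's own statement) =====
-- stated objective: alternative
-- what changed: Instead of building the full set of val-1 modular powers of each candidate g and counting its distinct elements, B walks x <- x*g mod val to compute g's multiplicative order directly, exiting early at the first power equal to one, and accepts g iff that order is exactly val-1.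
import Mathlib
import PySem

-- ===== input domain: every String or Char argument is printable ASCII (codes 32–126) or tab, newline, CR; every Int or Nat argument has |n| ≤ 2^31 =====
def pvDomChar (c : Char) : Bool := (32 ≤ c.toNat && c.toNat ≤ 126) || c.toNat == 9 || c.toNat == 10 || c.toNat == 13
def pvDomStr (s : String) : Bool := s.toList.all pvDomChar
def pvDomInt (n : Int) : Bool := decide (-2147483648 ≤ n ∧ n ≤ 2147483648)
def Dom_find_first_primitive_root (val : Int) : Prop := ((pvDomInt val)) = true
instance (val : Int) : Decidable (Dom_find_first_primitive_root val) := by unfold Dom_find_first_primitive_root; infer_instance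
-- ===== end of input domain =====

-- B computes each candidate's multiplicative order by walking x ← x*g % val with an
-- early exit at the first power equal to one, instead of building the whole set of
-- val-1 modular powers and counting its distinct elements (objective: alternative algorithm).

-- ===== PORT A =====
-- inner loop of A: build the set {pow(g, i, val) : i in range(1, val)} and test len == val-1
def pvA_isPrimRoot (val g : Int) : Bool :=
  decide ((((PySem.List.pyRange 1 val 1).foldl
      (fun s i => PySem.Set.add s (PySem.Int.powMod g i.toNat val))
      PySem.Set.empty).length : Int) = val - 1)

-- outer loop of A with its early return = first element of range(2, val) passing the test
def find_first_primitive_root (val : Int) : Option Int :=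
  (PySem.List.pyRange 2 val 1).find? (fun g => pvA_isPrimRoot val g)

-- ===== PORT B =====
-- B's while loop: x ← x*g % val, t ← t+1 while x ≠ 1 and t < val-1.
-- (Lean's % = Int.emod agrees with Python's % here: val ≥ 3 at every reachable call.)
def pvB_walk (val g x t : Int) : Nat → Int × Int
  | 0 => (x, t)
  | fuel + 1 =>
      if x ≠ 1 ∧ t < val - 1 then pvB_walk val g (x * g % val) (t + 1) fuel else (x, t)

def pvB_isPrimRoot (val g : Int) : Bool :=
  let r := pvB_walk val g g 1 (val - 2).toNat
  r.1 == 1 && r.2 == val - 1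

def find_first_primitive_root_alt (val : Int) : Option Int :=
  (PySem.List.pyRange 2 val 1).find? (fun g => pvB_isPrimRoot val g)

-- ===== PRECONDITION & SPEC =====
def Spec_find_first_primitive_root (val : Int) (out : Option Int) : Prop := out = find_first_primitive_root_alt val
instance (val : Int) (out : Option Int) : Decidable (Spec_find_first_primitive_root val out) := by unfold Spec_find_first_primitive_root; infer_instance

-- ===== CLAIM (what is proved, stated in full; the proofs are below) =====
def Claim_equal_find_first_primitive_root : Prop := ∀ (val : Int), Dom_find_first_primitive_root val → Spec_find_first_primitive_root val (find_first_primitive_root val)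

-- ===== LEMMAS AND PROOFS =====

-- find? respects pointwise-equal predicates
theorem pvFind?_congr {α : Type} {p q : α → Bool} :
    ∀ (l : List α), (∀ a ∈ l, p a = q a) → l.find? p = l.find? q := by
  intro l
  induction l with
  | nil => intro _; rfl
  | cons a l ih =>
      intro h
      simp only [List.find?_cons]
      rw [h a (by simp)]
      cases q a with
      | true => rfl
      | false => exact ih (fun b hb => h b (by simp [hb]))

-- a PySem set built from a list has as many elements as the list iff the list has no duplicates
theorem pvOfList_length_eq_iff {l : List Int} :
    (PySem.Set.ofList l).length = l.length ↔ l.Nodup := by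
  constructor
  · intro h
    have hto : (PySem.Set.ofList l).toFinset = l.toFinset := by
      ext x; simp [List.mem_toFinset, PySem.Set.mem_ofList]
    have hcard : (PySem.Set.ofList l).toFinset.card = (PySem.Set.ofList l).length :=
      List.toFinset_card_of_nodup (PySem.Set.nodup_ofList l)
    have h2 : l.dedup.length = l.length := by
      rw [hto] at hcard
      have := List.card_toFinset l
      omega
    have := (List.dedup_sublist l).eq_of_length h2
    exact List.dedup_eq_self.mp this
  · intro h
    rw [PySem.Set.ofList_eq_self_of_nodup l h]

-- the key number-theoretic fact, over ZMod N: the powers u^1, …, u^(N-1) are pairwise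
-- distinct iff u^(N-1) = 1 and no earlier positive power is 1
theorem pvKey (N : ℕ) (hN : 3 ≤ N) (u : ZMod N) :
    ((List.range (N - 1)).map (fun k => u ^ (k + 1))).Nodup
      ↔ (u ^ (N - 1) = 1 ∧ ∀ s : ℕ, 1 ≤ s → s < N - 1 → u ^ s ≠ 1) := by
  haveI : NeZero N := ⟨by omega⟩
  haveI : Fact (1 < N) := ⟨by omega⟩
  constructor
  · intro hnd
    have hinj := List.inj_on_of_nodup_map hnd
    have hex : ∃ t : ℕ, 1 ≤ t ∧ t ≤ N - 1 ∧ u ^ t = 1 := by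
      by_contra hno
      push Not at hno
      have h1M : (1 : ZMod N) ∉ (List.range (N - 1)).map (fun k => u ^ (k + 1)) := by
        intro h
        rcases List.mem_map.mp h with ⟨k, hk, hk1⟩
        exact hno (k + 1) (by omega) (by have := List.mem_range.mp hk; omega) hk1
      have hcard : ((List.range (N - 1)).map (fun k => u ^ (k + 1))).toFinset.card = N - 1 := by
        rw [List.toFinset_card_of_nodup hnd]
        simp
      have hcard2 : (insert (1 : ZMod N)
          ((List.range (N - 1)).map (fun k => u ^ (k + 1))).toFinset).card = N := by
        rw [Finset.card_insert_of_notMem (by simpa using h1M), hcard]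
        omega
      have huniv : insert (1 : ZMod N) ((List.range (N - 1)).map (fun k => u ^ (k + 1))).toFinset
          = Finset.univ := Finset.eq_univ_of_card _ (by rw [hcard2, ZMod.card])
      have hget : ∀ x : ZMod N, x ≠ 1 → ∃ k, k < N - 1 ∧ u ^ (k + 1) = x := by
        intro x hx
        have hxm : x ∈ insert (1 : ZMod N)
            ((List.range (N - 1)).map (fun k => u ^ (k + 1))).toFinset := by
          rw [huniv]; exact Finset.mem_univ x
        rcases Finset.mem_insert.mp hxm with h | h
        · exact absurd h hx
        · rcases List.mem_map.mp (List.mem_toFinset.mp h) with ⟨k, hk, hk1⟩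
          exact ⟨k, List.mem_range.mp hk, hk1⟩
      have h01 : (0 : ZMod N) ≠ 1 := zero_ne_one
      have h21 : (2 : ZMod N) ≠ 1 := by
        intro h
        have h2 : (1 : ZMod N) + 1 = 1 + 0 := by
          rw [add_zero, one_add_one_eq_two]; exact h
        exact one_ne_zero (add_left_cancel h2)
      have h31 : (3 : ZMod N) ≠ 1 := by
        intro h
        have h2 : (2 : ZMod N) = 0 := by
          have h3 : (2 : ZMod N) + 1 = 0 + 1 := by
            rw [zero_add, two_add_one_eq_three]; exact h
          exact add_right_cancel h3
        have h4 : ((2 : ℕ) : ZMod N) = 0 := by push_cast; exact h2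
        have hdvd := (ZMod.natCast_eq_zero_iff 2 N).mp h4
        have := Nat.le_of_dvd (by norm_num) hdvd
        omega
      obtain ⟨a, ha, hau⟩ := hget 0 h01
      obtain ⟨b, hb, hbu⟩ := hget 2 h21
      obtain ⟨c, hc, hcu⟩ := hget 3 h31
      have hpp : N.minFac.Prime := Nat.minFac_prime (by omega)
      haveI : Fact N.minFac.Prime := ⟨hpp⟩
      have hu0 : (ZMod.castHom (Nat.minFac_dvd N) (ZMod N.minFac)) u = 0 := by
        have h5 : ((ZMod.castHom (Nat.minFac_dvd N) (ZMod N.minFac)) u) ^ (a + 1) = 0 := by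
          rw [← map_pow, hau, map_zero]
        exact (pow_eq_zero_iff (by omega)).mp h5
      have hp2 : N.minFac ∣ 2 := by
        have h5 : (ZMod.castHom (Nat.minFac_dvd N) (ZMod N.minFac)) (2 : ZMod N) = 0 := by
          rw [← hbu, map_pow, hu0, zero_pow (by omega : b + 1 ≠ 0)]
        rw [map_ofNat] at h5
        have h6 : ((2 : ℕ) : ZMod N.minFac) = 0 := by push_cast; exact h5
        exact (ZMod.natCast_eq_zero_iff 2 N.minFac).mp h6
      have hp3 : N.minFac ∣ 3 := by
        have h5 : (ZMod.castHom (Nat.minFac_dvd N) (ZMod N.minFac)) (3 : ZMod N) = 0 := by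
          rw [← hcu, map_pow, hu0, zero_pow (by omega : c + 1 ≠ 0)]
        rw [map_ofNat] at h5
        have h6 : ((3 : ℕ) : ZMod N.minFac) = 0 := by push_cast; exact h5
        exact (ZMod.natCast_eq_zero_iff 3 N.minFac).mp h6
      have h2le := Nat.le_of_dvd (by norm_num) hp2
      have h3le := Nat.le_of_dvd (by norm_num) hp3
      have := hpp.two_le
      have hpeq : N.minFac = 2 := by omega
      rw [hpeq] at hp3
      omega
    obtain ⟨t, ht1, ht2, htu⟩ := hex
    have huniq : ∀ s : ℕ, 1 ≤ s → s ≤ N - 1 → u ^ s = 1 → s = N - 1 := by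
      intro s hs1 hs2 hsu
      by_contra hne
      have hs : s < N - 1 := by omega
      have hstep : u ^ (s + 1) = u ^ (0 + 1) := by
        rw [pow_succ, hsu, one_mul, zero_add, pow_one]
      have := hinj (List.mem_range.mpr hs) (List.mem_range.mpr (by omega : 0 < N - 1)) hstep
      omega
    have htN := huniq t ht1 ht2 htu
    rw [htN] at htu
    refine ⟨htu, fun s hs1 hs2 hsu => ?_⟩
    have := huniq s hs1 (by omega) hsu
    omega
  · rintro ⟨hN1, hmin⟩
    have key : ∀ a b : ℕ, a < b → b < N - 1 → u ^ (a + 1) = u ^ (b + 1) → False := by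
      intro a b hab hb h
      have c1 : u ^ (b - a) = 1 := by
        have h6 : u ^ (N - 1) * u ^ (b - a) = 1 := by
          rw [← pow_add, show (N - 1) + (b - a) = (N - 1 - (a + 1)) + (b + 1) from by omega,
            pow_add, ← h, ← pow_add, show (N - 1 - (a + 1)) + (a + 1) = N - 1 from by omega, hN1]
        rwa [hN1, one_mul] at h6
      exact hmin (b - a) (by omega) (by omega) c1
    refine List.Nodup.map_on ?_ List.nodup_range
    intro a hae b hbe hab
    by_contra hne
    rcases Nat.lt_or_ge a b with h | h
    · exact key a b h (List.mem_range.mp hbe) hab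
    · exact key b a (by omega) (List.mem_range.mp hae) hab.symm

-- B's while loop computes exactly "the first power equal to 1 is the (val-1)-st"
theorem pvWalk_iff (val g : Int) (_hval : 3 ≤ val) :
    ∀ (k : ℕ) (t : Int), (val - 1 - t).toNat = k → 1 ≤ t → t ≤ val - 1 →
      (pvB_walk val g (g ^ t.toNat % val) t k = (1, val - 1)
        ↔ (g ^ (val - 1).toNat % val = 1 ∧
            ∀ s : Int, t ≤ s → s < val - 1 → g ^ s.toNat % val ≠ 1)) := by
  intro k
  induction k with
  | zero =>
      intro t hk h1 ht
      have heq : t = val - 1 := by omega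
      subst heq
      show ((g ^ (val - 1).toNat % val, val - 1) : Int × Int) = (1, val - 1) ↔ _
      constructor
      · intro hEq
        refine ⟨(Prod.ext_iff.mp hEq).1, ?_⟩
        intro s hs1 hs2; omega
      · rintro ⟨hN1, -⟩
        rw [hN1]
  | succ k ih =>
      intro t hk h1 ht
      have htlt : t < val - 1 := by omega
      show (if g ^ t.toNat % val ≠ 1 ∧ t < val - 1 then
              pvB_walk val g (g ^ t.toNat % val * g % val) (t + 1) k else (g ^ t.toNat % val, t)) = (1, val - 1) ↔ _
      by_cases hx : g ^ t.toNat % val = 1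
      · rw [if_neg (by simp [hx])]
        constructor
        · intro hEq
          have := (Prod.ext_iff.mp hEq).2
          omega
        · rintro ⟨-, hmin⟩
          exact absurd hx (hmin t le_rfl htlt)
      · rw [if_pos ⟨hx, htlt⟩]
        have hx' : g ^ t.toNat % val * g % val = g ^ (t + 1).toNat % val := by
          have h1' : (t + 1).toNat = t.toNat + 1 := by omega
          rw [h1', pow_succ, Int.mul_emod, Int.emod_emod_of_dvd _ dvd_rfl,
            ← Int.mul_emod]
        rw [hx', ih (t + 1) (by omega) (by omega) (by omega)]
        constructor
        · rintro ⟨hN1, hmin⟩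
          refine ⟨hN1, fun s hs1 hs2 => ?_⟩
          by_cases hst : s = t
          · subst hst; exact hx
          · exact hmin s (by omega) hs2
        · rintro ⟨hN1, hmin⟩
          exact ⟨hN1, fun s hs1 hs2 => hmin s (by omega) hs2⟩

-- characterization of A's inner test
theorem pvA_char (val g : Int) (hval : 3 ≤ val) :
    pvA_isPrimRoot val g = true
      ↔ ((List.range (val - 1).toNat).map (fun k : ℕ => g ^ (k + 1) % val)).Nodup := by
  have hfold : (PySem.List.pyRange 1 val 1).foldl
      (fun s i => PySem.Set.add s (PySem.Int.powMod g i.toNat val)) PySem.Set.empty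
      = PySem.Set.ofList ((PySem.List.pyRange 1 val 1).map (fun i => PySem.Int.powMod g i.toNat val)) := by
    rw [PySem.Set.ofList_eq_foldl, List.foldl_map]
    rfl
  have hmap : (PySem.List.pyRange 1 val 1).map (fun i => PySem.Int.powMod g i.toNat val)
      = (List.range (val - 1).toNat).map (fun k : ℕ => g ^ (k + 1) % val) := by
    rw [PySem.List.pyRange_one, List.map_map]
    apply List.map_congr_left
    intro k hk
    simp only [Function.comp_apply]
    rw [PySem.Int.powMod_eq_emod _ _ (by omega : (0:Int) < val)]
    have h1 : (1 + (k : Int)).toNat = k + 1 := by omega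
    rw [h1]
  unfold pvA_isPrimRoot
  rw [hfold, hmap]
  set L := (List.range (val - 1).toNat).map (fun k : ℕ => g ^ (k + 1) % val) with hL
  have hlen : L.length = (val - 1).toNat := by
    simp [hL]
  have hle := PySem.Set.length_ofList_le L
  simp only [decide_eq_true_eq]
  constructor
  · intro h
    exact pvOfList_length_eq_iff.mp (by omega)
  · intro h
    have := pvOfList_length_eq_iff.mpr h
    omega

-- characterization of B's inner test
theorem pvB_char (val g : Int) (h2 : 2 ≤ g) (hlt : g < val) :
    pvB_isPrimRoot val g = true
      ↔ (g ^ (val - 1).toNat % val = 1 ∧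
          ∀ s : ℕ, 1 ≤ s → s < (val - 1).toNat → g ^ s % val ≠ 1) := by
  have hval : 3 ≤ val := by omega
  have hg1 : g ^ ((1 : Int)).toNat % val = g := by
    have : ((1 : Int)).toNat = 1 := rfl
    rw [this, pow_one]
    exact Int.emod_eq_of_lt (by omega) hlt
  have hw := pvWalk_iff val g hval (val - 2).toNat 1 (by omega) le_rfl (by omega)
  rw [hg1] at hw
  unfold pvB_isPrimRoot
  simp only [Bool.and_eq_true, beq_iff_eq]
  have hpair : (pvB_walk val g g 1 (val - 2).toNat).1 = 1 ∧ (pvB_walk val g g 1 (val - 2).toNat).2 = val - 1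
      ↔ pvB_walk val g g 1 (val - 2).toNat = (1, val - 1) := by
    rw [Prod.ext_iff]
  rw [hpair, hw]
  constructor
  · rintro ⟨hN1, hmin⟩
    refine ⟨hN1, fun s hs1 hs2 => ?_⟩
    have h := hmin (s : Int) (by omega) (by omega)
    simpa using h
  · rintro ⟨hN1, hmin⟩
    refine ⟨hN1, fun s hs1 hs2 => ?_⟩
    exact hmin s.toNat (by omega) (by omega)

-- bridge: equality of residues mod val is equality in ZMod val.toNat
theorem pvCast_iff (val : Int) (hval : 0 < val) (a b : Int) :
    a % val = b % val ↔ ((a : ZMod val.toNat) = (b : ZMod val.toNat)) := by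
  rw [ZMod.intCast_eq_intCast_iff]
  have : ((val.toNat : ℕ) : Int) = val := Int.toNat_of_nonneg (le_of_lt hval)
  rw [this]
  exact Iff.rfl

-- the two inner tests agree on every candidate g produced by the outer loop
theorem pvPred_eq (val g : Int) (h2 : 2 ≤ g) (hlt : g < val) :
    pvA_isPrimRoot val g = pvB_isPrimRoot val g := by
  have hval : 3 ≤ val := by omega
  rw [Bool.eq_iff_iff]
  rw [pvA_char val g hval, pvB_char val g h2 hlt]
  have hN3 : 3 ≤ val.toNat := by omega
  have hNN : (val - 1).toNat = val.toNat - 1 := by omega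
  have hpow : ∀ m : ℕ, ((g ^ m : Int) : ZMod val.toNat) = ((g : Int) : ZMod val.toNat) ^ m := by
    intro m; push_cast; ring
  have hbr : ∀ a b : ℕ, (g ^ a % val = g ^ b % val)
      ↔ (((g : Int) : ZMod val.toNat) ^ a = ((g : Int) : ZMod val.toNat) ^ b) := by
    intro a b
    rw [pvCast_iff val (by omega), hpow, hpow]
  have hbr1 : ∀ a : ℕ, (g ^ a % val = 1) ↔ (((g : Int) : ZMod val.toNat) ^ a = 1) := by
    intro a
    have h1 : (1 : Int) % val = 1 := Int.emod_eq_of_lt (by omega) (by omega)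
    constructor
    · intro h
      have : g ^ a % val = 1 % val := by rw [h1]; exact h
      have := (pvCast_iff val (by omega) _ _).mp this
      rw [hpow] at this
      simpa using this
    · intro h
      have : ((g ^ a : Int) : ZMod val.toNat) = ((1 : Int) : ZMod val.toNat) := by
        rw [hpow]; simpa using h
      have := (pvCast_iff val (by omega) _ _).mpr this
      rw [h1] at this
      exact this
  have hnd : ((List.range (val - 1).toNat).map (fun k : ℕ => g ^ (k + 1) % val)).Nodup
      ↔ ((List.range (val.toNat - 1)).map (fun k : ℕ => ((g : Int) : ZMod val.toNat) ^ (k + 1))).Nodup := by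
    rw [hNN]
    show List.Pairwise _ _ ↔ List.Pairwise _ _
    rw [List.pairwise_map, List.pairwise_map]
    constructor
    · intro hp
      refine hp.imp ?_
      intro a b hab hc
      exact hab ((hbr (a + 1) (b + 1)).mpr hc)
    · intro hp
      refine hp.imp ?_
      intro a b hab hc
      exact hab ((hbr (a + 1) (b + 1)).mp hc)
  rw [hnd, pvKey val.toNat hN3 (((g : Int) : ZMod val.toNat))]
  constructor
  · rintro ⟨ha, hb⟩
    constructor
    · rw [hNN]
      exact (hbr1 (val.toNat - 1)).mpr ha
    · intro s hs1 hs2 hc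
      exact hb s hs1 (by omega) ((hbr1 s).mp hc)
  · rintro ⟨ha, hb⟩
    constructor
    · rw [hNN] at ha
      exact (hbr1 (val.toNat - 1)).mp ha
    · intro s hs1 hs2 hc
      exact hb s hs1 (by omega) ((hbr1 s).mpr hc)

-- ===== VERDICT (by name: the statement is the Claim_ definition above) =====
theorem find_first_primitive_root_spec : Claim_equal_find_first_primitive_root := by
  intro val _
  unfold Spec_find_first_primitive_root find_first_primitive_root find_first_primitive_root_alt
  apply pvFind?_congr
  intro g hg
  rw [PySem.List.mem_pyRange_one] at hg
  exact pvPred_eq val g hg.1 hg.2
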